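-- pv_equiv track=rewrite | github.com/appleboy919/BaekJoon | Sorting/18870_coord_compress.py | coord_compress
-- ===== SOURCE A (Python) =====
-- def coord_compress(list):
--     coord = []
--     index = 0
--     for i in list:
--         coord.append((i, index))
--         index += 1
--     coord.sort()
--     num = 0
--     prv = coord[0][0]
--     for t in coord:
--         if t[0] != prv:
--             num += 1
--         list[t[1]] = num
--         prv = t[0]
--     return list
-- ===== SOURCE B (Python) =====
-- def coord_compress(list):
--     ranks = {v: r for r, v in enumerate(sorted(set(list)))}
--     list[:] = [ranks[v] for v in list]
--     return list
-- ===== Notes on version B (the rewrite author's own statement) =====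
-- stated objective: alternative
-- what changed: B builds a value-to-dense-rank table by enumerating the sorted distinct values and then rewrites the list by one table lookup per element, instead of A's sorting of (value, original-index) pairs and assigning ranks while walking the sorted pairs counting value changes.
-- outside the precondition, e.g. on coord_compress([]): A raises IndexError, B returns []
import Mathlib
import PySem

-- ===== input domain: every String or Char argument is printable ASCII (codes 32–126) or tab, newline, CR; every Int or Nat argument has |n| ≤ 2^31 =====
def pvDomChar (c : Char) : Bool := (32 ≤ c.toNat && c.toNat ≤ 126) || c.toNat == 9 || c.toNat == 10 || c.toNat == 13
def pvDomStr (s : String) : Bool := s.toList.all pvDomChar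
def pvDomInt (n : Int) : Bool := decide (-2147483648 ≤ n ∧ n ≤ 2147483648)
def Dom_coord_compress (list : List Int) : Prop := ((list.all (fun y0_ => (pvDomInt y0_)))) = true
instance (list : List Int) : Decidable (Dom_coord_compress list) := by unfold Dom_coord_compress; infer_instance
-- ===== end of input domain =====

-- B replaces A's sort-(value,index)-pairs-and-assign-while-walking strategy by a rank table over the sorted
-- distinct values plus one lookup pass (objective: alternative). Both Pythons mutate `list` in place and
-- return it; the equivalence proved here is about the return value.

-- ===== PORT A =====
-- Literal port of A. On [] Python raises IndexError at coord[0] (excluded by Pre_; the [] match arm is only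
-- a totality guard). `List.set t.2.toNat` is exact: every stored index is ≥ 0 and in range.
def coord_compress (list : List Int) : List Int :=
  let coord := (list.foldl (fun (acc : List (Int × Int) × Int) i => (acc.1 ++ [(i, acc.2)], acc.2 + 1)) ([], 0)).1
  let sc := PySem.List.sorted2 coord Prod.fst Prod.snd
  match sc with
  | [] => []
  | t0 :: _ =>
    (sc.foldl (fun (st : Int × Int × List Int) t =>
        let num := if t.1 ≠ st.2.1 then st.1 + 1 else st.1
        (num, t.1, st.2.2.set t.2.toNat num)) (0, t0.1, list)).2.2

-- ===== PORT B =====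
-- Literal port of Source B. `ranks.getD v 0` is Python's ranks[v]: the key is always present (v ∈ sorted(set(list))),
-- so the KeyError branch is unreachable and the default is a totality guard only.
def coord_compress_alt (list : List Int) : List Int :=
  let s := PySem.List.sorted (PySem.Set.ofList list) (fun x => x)
  let ranks := (PySem.List.enumerate s).foldl
      (fun (d : PySem.Dict Int Int) p => d.insert p.2 p.1) PySem.Dict.empty
  list.map (fun v => ranks.getD v 0)

-- ===== PRECONDITION & SPEC =====
-- Pre_ excludes only the empty list, on which A raises IndexError (coord[0]); B returns [] there.
def Pre_coord_compress (list : List Int) : Prop := list ≠ []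
instance (list : List Int) : Decidable (Pre_coord_compress list) := by
  unfold Pre_coord_compress; infer_instance
def pvWitness_coord_compress : List Int := [3, 1, 4, 1]

def Spec_coord_compress (list : List Int) (out : List Int) : Prop := out = coord_compress_alt list
instance (list : List Int) (out : List Int) : Decidable (Spec_coord_compress list out) := by
  unfold Spec_coord_compress; infer_instance

-- ===== CLAIM (what is proved, stated in full; the proofs are below) =====
def Claim_equal_coord_compress : Prop :=
  ∀ (list : List Int), Dom_coord_compress list → Pre_coord_compress list →
    Spec_coord_compress list (coord_compress list)

-- ===== LEMMAS AND PROOFS =====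

-- dense rank: number of distinct values of l strictly below v
def rk (l : List Int) (v : Int) : Int := ((l.toFinset.filter (fun u => u < v)).card : Int)

-- the non-strict lexicographic order (the negation of sorted2's strict `before` test, swapped)
def Rns (a b : Int × Int) : Prop := a.1 < b.1 ∨ (a.1 = b.1 ∧ a.2 ≤ b.2)

def lexBefore (a b : Int × Int) : Bool :=
  decide (a.1 < b.1) || !decide (b.1 < a.1) && decide (a.2 < b.2)

-- A's loop body, named for the proofs (definitionally the lambda in the port)
def stepA (st : Int × Int × List Int) (t : Int × Int) : Int × Int × List Int :=
  let num := if t.1 ≠ st.2.1 then st.1 + 1 else st.1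
  (num, t.1, st.2.2.set t.2.toNat num)

lemma lexBefore_true_iff (a b : Int × Int) :
    lexBefore a b = true ↔ (a.1 < b.1 ∨ (¬ b.1 < a.1 ∧ a.2 < b.2)) := by
  simp [lexBefore]

lemma lexBefore_false_iff (a b : Int × Int) : lexBefore a b = false ↔ Rns b a := by
  simp [lexBefore, Rns]; omega

lemma insertBy_pairwise (x : Int × Int) (acc : List (Int × Int)) (h : acc.Pairwise Rns) :
    (PySem.List.insertBy lexBefore x acc).Pairwise Rns := by
  induction acc with
  | nil => simp [PySem.List.insertBy]
  | cons y ys ih =>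
    rw [List.pairwise_cons] at h
    by_cases hb : lexBefore x y = true
    · have hxy : Rns x y := by
        rw [lexBefore_true_iff] at hb; unfold Rns; omega
      simp only [PySem.List.insertBy, hb, if_true]
      refine List.Pairwise.cons ?_ (List.Pairwise.cons h.1 h.2)
      intro z hz
      rcases List.mem_cons.mp hz with rfl | hz
      · exact hxy
      · have := h.1 z hz
        unfold Rns at *; omega
    · have hbf : lexBefore x y = false := by simpa using hb
      simp only [PySem.List.insertBy, hbf]
      refine List.Pairwise.cons ?_ (ih h.2)
      intro z hz
      rw [PySem.List.mem_insertBy] at hz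
      rcases hz with rfl | hz
      · exact (lexBefore_false_iff z y).mp hbf
      · exact h.1 z hz

lemma foldl_insertBy_pairwise (xs : List (Int × Int)) :
    ∀ acc, acc.Pairwise Rns →
      (xs.foldl (fun acc x => PySem.List.insertBy lexBefore x acc) acc).Pairwise Rns := by
  induction xs with
  | nil => intro acc h; simpa using h
  | cons x xs ih => intro acc h; exact ih _ (insertBy_pairwise x acc h)

lemma sorted2_pairwise_Rns (xs : List (Int × Int)) :
    (PySem.List.sorted2 xs Prod.fst Prod.snd).Pairwise Rns := by
  have h : PySem.List.sorted2 xs Prod.fst Prod.snd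
      = xs.foldl (fun acc x => PySem.List.insertBy lexBefore x acc) [] := rfl
  rw [h]
  exact foldl_insertBy_pairwise xs [] (by simp)

lemma coord_eq : ∀ (l : List Int) (acc : List (Int × Int)) (k : Int),
    (l.foldl (fun (a : List (Int × Int) × Int) i => (a.1 ++ [(i, a.2)], a.2 + 1)) (acc, k)).1
    = acc ++ (PySem.List.enumerate l k).map (fun p => (p.2, p.1)) := by
  intro l
  induction l with
  | nil => intro acc k; simp [PySem.List.enumerate]
  | cons x l ih =>
    intro acc k
    simp only [List.foldl_cons, PySem.List.enumerate_cons, List.map_cons]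
    rw [ih]
    simp

lemma rk_head (l : List Int) (w : Int) (rest : List Int)
    (hperm : (w :: rest).Perm l) (hsort : (w :: rest).Pairwise (· ≤ ·)) : rk l w = 0 := by
  unfold rk
  have : l.toFinset.filter (fun u => u < w) = ∅ := by
    rw [Finset.filter_eq_empty_iff]
    intro x hx
    have hx' : x ∈ w :: rest := hperm.mem_iff.mpr (List.mem_toFinset.mp hx)
    rw [List.pairwise_cons] at hsort
    rcases List.mem_cons.mp hx' with rfl | hx'
    · omega
    · have := hsort.1 x hx'; omega
  simp [this]

lemma rk_gap (l u r : List Int) (a b : Int) (hab : a ≠ b)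
    (hperm : (u ++ a :: b :: r).Perm l)
    (hsort : (u ++ a :: b :: r).Pairwise (· ≤ ·)) : rk l b = rk l a + 1 := by
  rw [List.pairwise_append] at hsort
  have hcross : ∀ x ∈ u, x ≤ a := fun x hx => hsort.2.2 x hx a (by simp)
  have hbr : a ≤ b ∧ ∀ x ∈ r, b ≤ x := by
    have h1 := hsort.2.1
    rw [List.pairwise_cons] at h1
    have h2 := h1.2
    rw [List.pairwise_cons] at h2
    exact ⟨h1.1 b (by simp), h2.1⟩
  have hal : a ∈ l := hperm.mem_iff.mp (by simp)
  have hset : l.toFinset.filter (fun u => u < b)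
      = insert a (l.toFinset.filter (fun u => u < a)) := by
    ext x
    simp only [Finset.mem_filter, Finset.mem_insert, List.mem_toFinset]
    constructor
    · rintro ⟨hxl, hxb⟩
      have hx' : x ∈ u ++ a :: b :: r := hperm.mem_iff.mpr hxl
      rw [List.mem_append] at hx'
      rcases hx' with hx' | hx'
      · have hxa := hcross x hx'
        rcases eq_or_lt_of_le hxa with rfl | hlt
        · exact Or.inl rfl
        · exact Or.inr ⟨hxl, hlt⟩
      · rcases List.mem_cons.mp hx' with rfl | hx'
        · exact Or.inl rfl
        · rcases List.mem_cons.mp hx' with rfl | hx'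
          · omega
          · have := hbr.2 x hx'; omega
    · rintro (rfl | ⟨hxl, hxa⟩)
      · exact ⟨hal, by omega⟩
      · exact ⟨hxl, by omega⟩
  unfold rk
  rw [hset, Finset.card_insert_of_notMem (by simp)]
  push_cast
  ring

lemma stage1 (l : List Int) :
    ∀ (ts : List (Int × Int)) (u : List Int) (prv : Int) (cur : List Int),
      (u ++ prv :: ts.map Prod.fst).Perm l →
      (u ++ prv :: ts.map Prod.fst).Pairwise (· ≤ ·) →
      (ts.foldl stepA (rk l prv, prv, cur)).2.2
        = ts.foldl (fun c t => c.set t.2.toNat (rk l t.1)) cur := by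
  intro ts
  induction ts with
  | nil => intro u prv cur _ _; rfl
  | cons t ts ih =>
    intro u prv cur hperm hsort
    have hnum : (if t.1 ≠ prv then rk l prv + 1 else rk l prv) = rk l t.1 := by
      by_cases h : t.1 = prv
      · simp [h]
      · rw [if_pos h]
        have := rk_gap l u (ts.map Prod.fst) prv t.1 (fun he => h he.symm)
          (by simpa using hperm) (by simpa using hsort)
        omega
    have hstep : stepA (rk l prv, prv, cur) t
        = (rk l t.1, t.1, cur.set t.2.toNat (rk l t.1)) := by
      simp only [stepA]
      rw [hnum]
    rw [List.foldl_cons, hstep, List.foldl_cons,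
      ih (u ++ [prv]) t.1 (cur.set t.2.toNat (rk l t.1)) (by simpa using hperm)
        (by simpa using hsort)]

lemma stage2_len (g : Int → Int) :
    ∀ (ts : List (Int × Int)) (cur : List Int),
      (ts.foldl (fun c t => c.set t.2.toNat (g t.1)) cur).length = cur.length := by
  intro ts
  induction ts with
  | nil => intro cur; rfl
  | cons t ts ih => intro cur; rw [List.foldl_cons, ih]; simp

lemma stage2 (l : List Int) (g : Int → Int) :
    ∀ (ts : List (Int × Int)) (cur : List Int),
      cur.length = l.length →
      (∀ t ∈ ts, ∃ (k : Nat) (_ : k < l.length), t = (l[k], (k : Int))) →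
      (ts.map Prod.snd).Nodup →
      ∀ (i : Nat) (hi : i < l.length),
        (ts.foldl (fun c t => c.set t.2.toNat (g t.1)) cur)[i]? =
          if ((i : Int) ∈ ts.map Prod.snd) then some (g l[i]) else cur[i]? := by
  intro ts
  induction ts with
  | nil => intro cur _ _ _ i _; simp
  | cons t ts ih =>
    intro cur hlen hmem hnd i hi
    obtain ⟨k, hk, rfl⟩ := hmem t (List.mem_cons_self)
    rw [List.map_cons, List.nodup_cons] at hnd
    have hlen' : (cur.set ((k : Int)).toNat (g l[k])).length = l.length := by
      simpa using hlen
    rw [List.foldl_cons]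
    rw [ih _ hlen' (fun t ht => hmem t (List.mem_cons_of_mem _ ht)) hnd.2 i hi]
    simp only [List.map_cons]
    by_cases h1 : (i : Int) ∈ ts.map Prod.snd
    · rw [if_pos h1, if_pos (by simp [h1])]
    · rw [if_neg h1]
      by_cases h2 : k = i
      · subst h2
        rw [if_pos (by simp)]
        simp only [Int.toNat_natCast]
        rw [List.getElem?_set]
        simp [hlen ▸ hk]
      · rw [if_neg (by
          intro hc
          rcases List.mem_cons.mp hc with hc | hc
          · simp at hc; omega
          · exact h1 hc)]
        simp only [Int.toNat_natCast]
        rw [List.getElem?_set]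
        rw [if_neg (by omega)]

lemma A_eq_map (l : List Int) (hne : l ≠ []) : coord_compress l = l.map (rk l) := by
  have hC : (l.foldl (fun (acc : List (Int × Int) × Int) i => (acc.1 ++ [(i, acc.2)], acc.2 + 1)) ([], 0)).1
      = (PySem.List.enumerate l).map (fun p => (p.2, p.1)) := by simpa using coord_eq l [] 0
  unfold coord_compress
  rw [hC]
  simp only []
  split
  case _ heq =>
    exfalso
    have h1 := (PySem.List.sorted2_perm ((PySem.List.enumerate l).map (fun p => (p.2, p.1))) Prod.fst Prod.snd false).length_eq
    rw [heq] at h1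
    simp [PySem.List.length_enumerate] at h1
    exact hne (List.eq_nil_of_length_eq_zero h1.symm)
  case _ t0 rest heq =>
    have hperm : (t0 :: rest).Perm ((PySem.List.enumerate l).map (fun p => (p.2, p.1))) := by
      rw [← heq]; exact PySem.List.sorted2_perm _ _ _ _
    have hRns : (t0 :: rest).Pairwise Rns := by
      rw [← heq]; exact sorted2_pairwise_Rns _
    have hCfst : ((PySem.List.enumerate l).map (fun p : Int × Int => (p.2, p.1))).map Prod.fst = l := by
      rw [List.map_map]
      exact PySem.List.map_snd_enumerate l 0
    have hW : ((t0 :: rest).map Prod.fst).Perm l := hCfst ▸ hperm.map Prod.fst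
    have hWsort : ((t0 :: rest).map Prod.fst).Pairwise (· ≤ ·) := by
      refine List.Pairwise.map Prod.fst (fun a b h => ?_) hRns
      unfold Rns at h; omega
    have hCsnd : ((PySem.List.enumerate l).map (fun p : Int × Int => (p.2, p.1))).map Prod.snd
        = PySem.List.pyRange 0 (0 + (l.length : Int)) := by
      rw [List.map_map]
      exact PySem.List.map_fst_enumerate l 0
    have hsnd : ((t0 :: rest).map Prod.snd).Perm (PySem.List.pyRange 0 (0 + (l.length : Int))) :=
      hCsnd ▸ hperm.map Prod.snd
    have hnd : ((t0 :: rest).map Prod.snd).Nodup :=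
      hsnd.nodup_iff.mpr (PySem.List.nodup_pyRange_one _ _)
    have hmem : ∀ t ∈ (t0 :: rest), ∃ (k : Nat) (_ : k < l.length), t = (l[k], (k : Int)) := by
      intro t ht
      have ht' := hperm.mem_iff.mp ht
      obtain ⟨p, hp, hpt⟩ := List.mem_map.mp ht'
      obtain ⟨k, hk, rfl⟩ := (PySem.List.mem_enumerate_iff l 0 p).mp hp
      exact ⟨k, hk, by rw [← hpt]; simp⟩
    have hcover : ∀ (i : Nat), i < l.length → ((i : Int) ∈ (t0 :: rest).map Prod.snd) := by
      intro i hi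
      rw [hsnd.mem_iff, PySem.List.mem_pyRange_one]
      omega
    -- the first loop iteration: t0.1 = prv, so num stays 0 = rk l t0.1
    have hrk0 : rk l t0.1 = 0 :=
      rk_head l t0.1 (rest.map Prod.fst) (by simpa using hW) (by simpa using hWsort)
    have hfold : (List.foldl stepA ((0 : Int), t0.1, l) (t0 :: rest)).2.2
        = List.foldl (fun c t => c.set t.2.toNat (rk l t.1)) l (t0 :: rest) := by
      rw [List.foldl_cons, List.foldl_cons]
      have hstep : stepA ((0 : Int), t0.1, l) t0 = (rk l t0.1, t0.1, l.set t0.2.toNat (rk l t0.1)) := by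
        simp [stepA, hrk0]
      rw [hstep]
      exact stage1 l rest [] t0.1 _ (by simpa using hW) (by simpa using hWsort)
    rw [heq]
    show (List.foldl stepA ((0 : Int), t0.1, l) (t0 :: rest)).2.2 = l.map (rk l)
    rw [hfold]
    apply List.ext_getElem?
    intro i
    by_cases hi : i < l.length
    · rw [stage2 l (rk l) (t0 :: rest) l rfl hmem hnd i hi, if_pos (hcover i hi),
        List.getElem?_map, List.getElem?_eq_getElem hi]
      rfl
    · have h1 : (List.foldl (fun c t => c.set t.2.toNat (rk l t.1)) l (t0 :: rest)).length = l.length :=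
        stage2_len (rk l) _ l
      rw [List.getElem?_eq_none (by omega), List.getElem?_eq_none (by simp; omega)]

lemma rk_strict (s : List Int) (hs : s.Pairwise (· < ·)) (j : Nat) (hj : j < s.length)
    (l : List Int) (htf : l.toFinset = s.toFinset) : rk l s[j] = (j : Int) := by
  have hnd : s.Nodup := hs.imp (fun h => ne_of_lt h)
  have hset : s.toFinset.filter (fun u => u < s[j]) = (s.take j).toFinset := by
    ext x
    simp only [Finset.mem_filter, List.mem_toFinset]
    constructor
    · rintro ⟨hx, hlt⟩
      obtain ⟨i, hi, hxi⟩ := List.mem_iff_getElem.mp hx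
      have hij : i < j := by
        by_contra hij
        rcases Nat.lt_or_ge j i with h' | h'
        · have := List.pairwise_iff_getElem.mp hs j i hj hi h'
          omega
        · have : i = j := by omega
          subst this
          rw [hxi] at hlt
          omega
      have hi' : i < (s.take j).length := by
        rw [List.length_take]; omega
      have : (s.take j)[i] = x := by
        rw [List.getElem_take]; exact hxi
      exact this ▸ List.getElem_mem hi'
    · intro hx
      obtain ⟨i, hi, hxi⟩ := List.mem_iff_getElem.mp hx
      have hi2 : i < j := by
        rw [List.length_take] at hi; omega
      have hi3 : i < s.length := by omega
      have hxi' : s[i] = x := by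
        rw [← hxi, List.getElem_take]
      constructor
      · exact hxi' ▸ List.getElem_mem hi3
      · rw [← hxi']
        exact List.pairwise_iff_getElem.mp hs i j hi3 hj hi2
  unfold rk
  rw [htf, hset, List.toFinset_card_of_nodup (hnd.sublist (List.take_sublist j s))]
  rw [List.length_take]
  push_cast
  omega

lemma B_eq_map (l : List Int) : coord_compress_alt l = l.map (rk l) := by
  have hs_lt : (PySem.List.sorted (PySem.Set.ofList l) (fun x => x)).Pairwise (· < ·) :=
    PySem.List.sorted_ofList_pairwise_lt l
  have hnds : (PySem.List.sorted (PySem.Set.ofList l) (fun x => x)).Nodup :=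
    hs_lt.imp (fun h => ne_of_lt h)
  have hmem_s : ∀ v : Int, v ∈ PySem.List.sorted (PySem.Set.ofList l) (fun x => x) ↔ v ∈ l := by
    intro v
    rw [PySem.List.mem_sorted, PySem.Set.mem_ofList]
  have htf : l.toFinset = (PySem.List.sorted (PySem.Set.ofList l) (fun x => x)).toFinset := by
    ext x
    simp only [List.mem_toFinset]
    exact (hmem_s x).symm
  have hsnd : List.map (fun p : Int × Int => p.2)
        (PySem.List.enumerate (PySem.List.sorted (PySem.Set.ofList l) (fun x => x)))
      = PySem.List.sorted (PySem.Set.ofList l) (fun x => x) :=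
    PySem.List.map_snd_enumerate _ 0
  have hitems : ((PySem.List.enumerate (PySem.List.sorted (PySem.Set.ofList l) (fun x => x))).foldl
        (fun (d : PySem.Dict Int Int) p => d.insert p.2 p.1) PySem.Dict.empty).items
      = (PySem.List.enumerate (PySem.List.sorted (PySem.Set.ofList l) (fun x => x))).map
          (fun p => (p.2, p.1)) := by
    have h := PySem.Dict.items_foldl_insert_fresh
      (PySem.List.enumerate (PySem.List.sorted (PySem.Set.ofList l) (fun x => x)))
      Prod.snd Prod.fst PySem.Dict.empty
      (fun a _ => PySem.Dict.contains_empty _) (by rw [hsnd]; exact hnds)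
    simpa using h
  have hkeys : ((PySem.List.enumerate (PySem.List.sorted (PySem.Set.ofList l) (fun x => x))).foldl
        (fun (d : PySem.Dict Int Int) p => d.insert p.2 p.1) PySem.Dict.empty).keys
      = PySem.List.sorted (PySem.Set.ofList l) (fun x => x) := by
    simp only [PySem.Dict.keys, hitems, List.map_map]
    exact hsnd
  unfold coord_compress_alt
  simp only []
  apply List.map_congr_left
  intro v hv
  obtain ⟨j, hj, hjv⟩ := List.mem_iff_getElem.mp ((hmem_s v).mpr hv)
  have hpair : ((PySem.List.sorted (PySem.Set.ofList l) (fun x => x))[j], ((0 : Int) + (j : Int))) ∈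
      ((PySem.List.enumerate (PySem.List.sorted (PySem.Set.ofList l) (fun x => x))).foldl
        (fun (d : PySem.Dict Int Int) p => d.insert p.2 p.1) PySem.Dict.empty).items := by
    rw [hitems]
    exact List.mem_map.mpr ⟨((0 : Int) + (j : Int), (PySem.List.sorted (PySem.Set.ofList l) (fun x => x))[j]),
      (PySem.List.mem_enumerate_iff _ 0 _).mpr ⟨j, hj, rfl⟩, rfl⟩
  have hget := PySem.Dict.getD_of_mem_items _ hpair (by rw [hkeys]; exact hnds) 0
  rw [← hjv, hget]
  rw [rk_strict _ hs_lt j hj l htf]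
  omega

-- ===== VERDICT (by name: the statement is the Claim_ definition above) =====
theorem coord_compress_spec : Claim_equal_coord_compress := by
  intro list _ hpre
  unfold Spec_coord_compress
  rw [A_eq_map list hpre, B_eq_map]
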